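-- pv_equiv track=rewrite | github.com/LilianaLukash/Master1 | 0405phone.py | sanitize_phone_number
-- ===== SOURCE A (Python) =====
-- def sanitize_phone_number(phone):
--     phone1 =  phone.strip()
--     todelete = [" ","(", "-",")" , "+"]
--     result = ""
--     for symbol in phone1:
--         if symbol not in todelete:
--             result = result + symbol
--     return result
-- ===== SOURCE B (Python) =====
-- def sanitize_phone_number(phone):
--     result = phone.strip()
--     for c in [' ', '(', ')', '-', '+']:
--         result = result.replace(c, "")
--     return result
-- ===== Notes on version B (the rewrite author's own statement) =====
-- stated objective: idiomatic
-- what changed: A builds the result by a single per-character membership-filter pass; B strips once and then makes one str.replace pass per unwanted character, deleting each character class in turn.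
import Mathlib
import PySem

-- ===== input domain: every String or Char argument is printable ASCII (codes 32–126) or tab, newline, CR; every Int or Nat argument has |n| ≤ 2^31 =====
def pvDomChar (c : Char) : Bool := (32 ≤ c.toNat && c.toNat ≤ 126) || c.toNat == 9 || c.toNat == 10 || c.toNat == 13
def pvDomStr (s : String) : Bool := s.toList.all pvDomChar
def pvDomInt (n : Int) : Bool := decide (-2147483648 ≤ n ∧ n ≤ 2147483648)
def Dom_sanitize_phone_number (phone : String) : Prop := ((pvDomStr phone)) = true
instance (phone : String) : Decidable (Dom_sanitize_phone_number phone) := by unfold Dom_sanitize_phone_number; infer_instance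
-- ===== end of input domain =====

-- B replaces A's single membership-filter pass with strip() followed by one str.replace pass
-- per unwanted character (idiomatic; same cost).


-- ===== PORT A =====
-- result = result + symbol is kept as list-of-chars accumulation; final String.mk renders it.
def sanitize_phone_number (phone : String) : String :=
  let phone1 := PySem.Str.strip phone
  let todelete : List Char := [' ', '(', '-', ')', '+']
  String.ofList (phone1.toList.foldl
    (fun result symbol => if todelete.contains symbol then result else result ++ [symbol]) [])

-- ===== PORT B =====
def sanitize_phone_number_alt (phone : String) : String :=
  ([' ', '(', ')', '-', '+']).foldl
    (fun result c => PySem.Str.replace result (String.singleton c) "")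
    (PySem.Str.strip phone)

-- ===== PRECONDITION & SPEC =====
def Spec_sanitize_phone_number (phone : String) (out : String) : Prop := out = sanitize_phone_number_alt phone
instance (phone : String) (out : String) : Decidable (Spec_sanitize_phone_number phone out) := by unfold Spec_sanitize_phone_number; infer_instance

-- ===== CLAIM (what is proved, stated in full; the proofs are below) =====
def Claim_equal_sanitize_phone_number : Prop := ∀ (phone : String), Dom_sanitize_phone_number phone → Spec_sanitize_phone_number phone (sanitize_phone_number phone)

-- ===== LEMMAS AND PROOFS =====

-- A's loop: 'if symbol in todelete: skip else append' is a filter by the negated test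
theorem foldl_skip_if (p : Char → Bool) (l acc : List Char) :
    l.foldl (fun r s => if p s then r else r ++ [s]) acc
      = acc ++ l.filter (fun s => !p s) := by
  induction l generalizing acc with
  | nil => simp
  | cons x t ih =>
      by_cases hx : p x = true <;> simp [List.foldl, hx, ih]

-- replace.go with a one-character pattern and empty replacement is a filter
theorem replace_go_single (c : Char) (l acc : List Char) (fuel : Nat)
    (h : l.length ≤ fuel) :
    PySem.Chars.replace.go [c] [] fuel l acc = acc.reverse ++ l.filter (· ≠ c) := by
  induction l generalizing fuel acc with
  | nil =>
      cases fuel <;> simp [PySem.Chars.replace.go]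
  | cons x t ih =>
      cases fuel with
      | zero => simp at h
      | succ f =>
        simp only [List.length_cons, Nat.succ_le_succ_iff] at h
        by_cases hx : x = c
        · subst hx
          simp [PySem.Chars.replace.go, List.isPrefixOf, ih _ f h]
        · simp [PySem.Chars.replace.go, List.isPrefixOf, hx, Ne.symm hx, ih _ f h]

theorem replace_single (c : Char) (l : List Char) :
    PySem.Chars.replace l [c] [] = l.filter (· ≠ c) := by
  rw [PySem.Chars.replace]
  simp [replace_go_single c l [] l.length (le_refl _)]

-- ===== VERDICT (by name: the statement is the Claim_ definition above) =====
theorem sanitize_phone_number_spec : Claim_equal_sanitize_phone_number := by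
  intro phone _
  unfold Spec_sanitize_phone_number sanitize_phone_number sanitize_phone_number_alt
  apply String.ext
  simp only [String.toList_ofList]
  rw [foldl_skip_if]
  -- unfold B's five-step fold over the concrete character list
  simp only [List.foldl]
  simp only [PySem.Str.toList_replace, String.toList_singleton, String.toList_empty,
    replace_single, List.filter_filter, List.nil_append]
  apply List.filter_congr
  intro a _
  by_cases h1 : a = ' ' <;> by_cases h2 : a = '(' <;> by_cases h3 : a = ')' <;>
    by_cases h4 : a = '-' <;> by_cases h5 : a = '+' <;>
    simp [h1, h2, h3, h4, h5]
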